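-- pv_equiv track=rewrite | github.com/andrew14420100/netflix | scripts/final_cdn_mapping.py | find_sc_match
-- ===== SOURCE A (Python) =====
-- def find_sc_match(results, expected_name):
--     """Find best SC match"""
--     name_lower = expected_name.lower().strip()
--     # Exact match
--     for r in results:
--         if r["name"].lower().strip() == name_lower:
--             return r
--     # Contains match
--     for r in results:
--         rn = r["name"].lower()
--         if name_lower in rn or rn in name_lower:
--             return r
--     # First word match
--     words = name_lower.split()
--     if len(words) >= 2:
--         for r in results:
--             rn = r["name"].lower()
--             if words[0] in rn and (words[-1] in rn or words[1] in rn):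
--                 return r
--     return results[0] if len(results) == 1 else None
-- ===== SOURCE B (Python) =====
-- def find_sc_match(results, expected_name):
--     """Find best SC match: single pass, tracking the best (lowest) priority tier."""
--     name_lower = expected_name.lower().strip()
--     words = name_lower.split()
--
--     def tier(r):
--         rn = r["name"].lower()
--         if rn.strip() == name_lower:
--             return 0
--         if name_lower in rn or rn in name_lower:
--             return 1
--         if len(words) >= 2 and words[0] in rn and (words[-1] in rn or words[1] in rn):
--             return 2
--         return 3
--
--     best_tier = 3
--     best = None
--     for r in results:
--         t = tier(r)
--         if t < best_tier:
--             best_tier = t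
--             best = r
--     if best is not None:
--         return best
--     return results[0] if len(results) == 1 else None
-- ===== Notes on version B (the rewrite author's own statement) =====
-- stated objective: alternative
-- what changed: Replaces A's three sequential scans (exact / contains / word-match, each restarting from the front) by a single pass that assigns every result a priority tier and keeps the earliest result of the lowest tier, updating only on a strictly lower tier.
-- outside the precondition, e.g. on find_sc_match([{'name': 'x'}, {}], 'x'): A returns {'name': 'x'}, B raises KeyError
import Mathlib
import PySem

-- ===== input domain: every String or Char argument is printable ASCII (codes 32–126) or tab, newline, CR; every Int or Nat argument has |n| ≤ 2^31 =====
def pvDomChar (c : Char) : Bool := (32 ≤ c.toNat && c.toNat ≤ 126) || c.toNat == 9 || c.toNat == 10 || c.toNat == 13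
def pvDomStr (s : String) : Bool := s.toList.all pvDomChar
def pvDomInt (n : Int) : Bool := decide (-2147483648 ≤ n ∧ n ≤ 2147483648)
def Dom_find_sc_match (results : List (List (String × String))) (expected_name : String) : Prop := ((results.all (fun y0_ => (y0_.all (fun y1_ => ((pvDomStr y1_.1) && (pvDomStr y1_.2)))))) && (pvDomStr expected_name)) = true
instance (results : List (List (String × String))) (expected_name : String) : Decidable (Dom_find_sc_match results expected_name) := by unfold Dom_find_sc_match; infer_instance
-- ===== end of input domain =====

-- B replaces A's three sequential scans by a single pass that tracks the best
-- priority tier (alternative decomposition, same per-element work; return value only).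

-- r["name"] (under Pre_ the key is present, so the default is never used)
def pvNameOf (r : List (String × String)) : String :=
  ((PySem.Dict.mk r).get? "name").getD ""

-- ===== PORT A =====
-- a Python 'for r in l: if p(r): return r' loop
def pvLoopFirst {α : Type} (p : α → Bool) : List α → Option α
  | [] => none
  | r :: rest => if p r then some r else pvLoopFirst p rest

def find_sc_match (results : List (List (String × String))) (expected_name : String) : Option (List (String × String)) :=
  let name_lower := PySem.Str.strip (PySem.Str.lower expected_name)
  -- Exact match
  match pvLoopFirst (fun r => PySem.Str.strip (PySem.Str.lower (pvNameOf r)) == name_lower) results with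
  | some r => some r
  | none =>
    -- Contains match
    match pvLoopFirst (fun r =>
        let rn := PySem.Str.lower (pvNameOf r)
        PySem.Str.isIn name_lower rn || PySem.Str.isIn rn name_lower) results with
    | some r => some r
    | none =>
      -- First word match
      let words := PySem.Str.split₀ name_lower
      match (if 2 ≤ words.length then
               pvLoopFirst (fun r =>
                 let rn := PySem.Str.lower (pvNameOf r)
                 PySem.Str.isIn ((PySem.List.pyGet? words 0).getD "") rn &&
                   (PySem.Str.isIn ((PySem.List.pyGet? words (-1)).getD "") rn ||
                    PySem.Str.isIn ((PySem.List.pyGet? words 1).getD "") rn)) results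
             else none) with
      | some r => some r
      | none => if results.length = 1 then PySem.List.pyGet? results 0 else none

-- ===== PORT B =====
-- the tier(r) helper of Source B
def pvTier (name_lower : String) (words : List String) (r : List (String × String)) : Nat :=
  let rn := PySem.Str.lower (pvNameOf r)
  if PySem.Str.strip rn == name_lower then 0
  else if PySem.Str.isIn name_lower rn || PySem.Str.isIn rn name_lower then 1
  else if decide (2 ≤ words.length) &&
          (PySem.Str.isIn ((PySem.List.pyGet? words 0).getD "") rn &&
            (PySem.Str.isIn ((PySem.List.pyGet? words (-1)).getD "") rn ||
             PySem.Str.isIn ((PySem.List.pyGet? words 1).getD "") rn)) then 2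
  else 3

-- Source B's single 'for r in results' loop; the accumulator is (best_tier, best),
-- 'none' standing for best_tier = 3, best = None
def pvScan {α : Type} (tier : α → Nat) : List α → Option (Nat × α) → Option (Nat × α)
  | [], acc => acc
  | r :: rest, acc =>
    let t := tier r
    pvScan tier rest
      (if t < (match acc with | none => 3 | some (bt, _) => bt) then some (t, r) else acc)

def find_sc_match_alt (results : List (List (String × String))) (expected_name : String) : Option (List (String × String)) :=
  let name_lower := PySem.Str.strip (PySem.Str.lower expected_name)
  let words := PySem.Str.split₀ name_lower
  match pvScan (pvTier name_lower words) results none with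
  | some (_, best) => some best
  | none => if results.length = 1 then PySem.List.pyGet? results 0 else none

-- ===== PRECONDITION & SPEC =====
-- Pre_ excludes results containing a dict without a "name" key: Python A raises KeyError
-- there unless an earlier element already matched, and Python B always raises KeyError.
def Pre_find_sc_match (results : List (List (String × String))) (expected_name : String) : Prop :=
  ∀ r ∈ results, (PySem.Dict.mk r).contains "name" = true
instance (results : List (List (String × String))) (expected_name : String) : Decidable (Pre_find_sc_match results expected_name) := by unfold Pre_find_sc_match; infer_instance
def pvWitness_find_sc_match : (List (List (String × String))) × String :=
  ([[("name", "Foo Bar")], [("name", "baz")]], "foo bar")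

def Spec_find_sc_match (results : List (List (String × String))) (expected_name : String) (out : Option (List (String × String))) : Prop := out = find_sc_match_alt results expected_name
instance (results : List (List (String × String))) (expected_name : String) (out : Option (List (String × String))) : Decidable (Spec_find_sc_match results expected_name out) := by unfold Spec_find_sc_match; infer_instance

-- ===== CLAIM (what is proved, stated in full; the proofs are below) =====
def Claim_equal_find_sc_match : Prop := ∀ (results : List (List (String × String))) (expected_name : String), Dom_find_sc_match results expected_name → Pre_find_sc_match results expected_name → Spec_find_sc_match results expected_name (find_sc_match results expected_name)

-- ===== LEMMAS AND PROOFS =====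

-- the current best tier of the accumulator (3 = nothing kept yet)
def pvAccTier {α : Type} (acc : Option (Nat × α)) : Nat :=
  match acc with | none => 3 | some (t, _) => t

-- merging a later scan result into an earlier accumulator
def pvMerge {α : Type} (acc s : Option (Nat × α)) : Option (Nat × α) :=
  match s with
  | none => acc
  | some (t, r) => if t < pvAccTier acc then some (t, r) else acc

-- a generic three-tier classifier; pvTier is an instance of it
def pvGTier {α : Type} (P0 P1 P2 : α → Bool) (g : Bool) (r : α) : Nat :=
  if P0 r then 0 else if P1 r then 1 else if g && P2 r then 2 else 3

theorem pvGTier_le {α : Type} (P0 P1 P2 : α → Bool) (g : Bool) (r : α) :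
    pvGTier P0 P1 P2 g r ≤ 3 := by
  unfold pvGTier; split_ifs <;> omega

theorem pvScan_merge {α : Type} (tier : α → Nat) (ht : ∀ r, tier r ≤ 3)
    (l : List α) : ∀ acc, pvAccTier acc ≤ 3 →
    pvScan tier l acc = pvMerge acc (pvScan tier l none) := by
  induction l with
  | nil => intro acc _; simp [pvScan, pvMerge]
  | cons r rest ih =>
    intro acc hacc
    have htr := ht r
    simp only [pvScan]
    have hstep : ∀ a : Option (Nat × α), pvAccTier a ≤ 3 →
        pvAccTier (if tier r < (match a with | none => 3 | some (bt, _) => bt) then some (tier r, r) else a) ≤ 3 := by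
      intro a ha
      rcases a with _ | ⟨bt, br⟩ <;> simp [pvAccTier] at ha ⊢ <;> split_ifs <;> simp [pvAccTier] <;> omega
    rw [ih _ (hstep acc hacc), ih _ (hstep none (by simp [pvAccTier]))]
    rcases hS : pvScan tier rest none with _ | ⟨ts, rs⟩
    · rcases acc with _ | ⟨ta, ra⟩
      · by_cases h1 : tier r < 3 <;> simp [pvMerge, pvAccTier, h1]
      · simp only [pvAccTier] at hacc
        by_cases h1 : tier r < 3 <;> by_cases h2 : tier r < ta <;>
          simp [pvMerge, pvAccTier, h1, h2] <;> omega
    · rcases acc with _ | ⟨ta, ra⟩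
      · by_cases h1 : tier r < 3 <;> by_cases h3 : ts < tier r <;> by_cases h5 : ts < 3 <;>
          simp [pvMerge, pvAccTier, h1, h3, h5] <;> omega

      · simp only [pvAccTier] at hacc
        by_cases h1 : tier r < 3 <;> by_cases h2 : tier r < ta <;>
          by_cases h3 : ts < tier r <;> by_cases h4 : ts < ta <;> by_cases h5 : ts < 3 <;>
          simp [pvMerge, pvAccTier, h1, h2, h3, h4, h5] <;> omega

-- A's three-phase chain, carrying the tier of the found element
def pvChainT {α : Type} (P0 P1 P2 : α → Bool) (g : Bool) (l : List α) : Option (Nat × α) :=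
  match pvLoopFirst P0 l with
  | some r => some (0, r)
  | none =>
    match pvLoopFirst P1 l with
    | some r => some (1, r)
    | none => if g then (pvLoopFirst P2 l).map (fun r => (2, r)) else none

theorem pvScan_eq_chainT {α : Type} (P0 P1 P2 : α → Bool) (g : Bool) (l : List α) :
    pvScan (pvGTier P0 P1 P2 g) l none = pvChainT P0 P1 P2 g l := by
  induction l with
  | nil => simp [pvScan, pvChainT, pvLoopFirst]
  | cons r rest ih =>
    have hmerge := pvScan_merge (pvGTier P0 P1 P2 g) (pvGTier_le P0 P1 P2 g) rest
    by_cases h0 : P0 r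
    · have ht : pvGTier P0 P1 P2 g r = 0 := by simp [pvGTier, h0]
      simp only [pvScan, ht, pvAccTier]
      rw [hmerge _ (by simp [pvAccTier])]
      rcases hS : pvScan (pvGTier P0 P1 P2 g) rest none with _ | ⟨ts, rs⟩ <;>
        simp [pvMerge, pvAccTier, pvChainT, pvLoopFirst, h0]
    · by_cases h1 : P1 r
      · have ht : pvGTier P0 P1 P2 g r = 1 := by simp [pvGTier, h0, h1]
        simp only [pvScan, ht, pvAccTier]
        rw [hmerge _ (by simp [pvAccTier]), ih]
        simp only [pvChainT, pvLoopFirst, h0, h1, if_neg, if_pos, Bool.not_eq_true]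
        rcases hP0 : pvLoopFirst P0 rest with _ | r' <;>
          [skip; simp [pvMerge, pvAccTier]]
        rcases hP1 : pvLoopFirst P1 rest with _ | r' <;>
          by_cases hg : g <;>
          simp [pvMerge, pvAccTier, hg] <;>
          rcases hP2 : pvLoopFirst P2 rest with _ | r' <;> simp [pvMerge, pvAccTier]
      · by_cases h2 : g && P2 r
        · have ht : pvGTier P0 P1 P2 g r = 2 := by simp [pvGTier, h0, h1, h2]
          have hg : g = true := by revert h2; cases g <;> simp
          have hP2r : P2 r = true := by revert h2; cases P2 r <;> simp
          simp only [pvScan, ht, pvAccTier]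
          rw [hmerge _ (by simp [pvAccTier]), ih]
          simp only [pvChainT, pvLoopFirst, h0, h1, hg, hP2r, Bool.not_eq_true]
          rcases hP0 : pvLoopFirst P0 rest with _ | r' <;>
            [skip; simp [pvMerge, pvAccTier]]
          rcases hP1 : pvLoopFirst P1 rest with _ | r' <;>
            simp [pvMerge, pvAccTier] <;>
            rcases hP2 : pvLoopFirst P2 rest with _ | r' <;> simp [pvMerge, pvAccTier]
        · have ht : pvGTier P0 P1 P2 g r = 3 := by simp [pvGTier, h0, h1, h2]
          simp only [pvScan, ht, pvAccTier]
          rw [if_neg (lt_irrefl 3), ih]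
          simp only [pvChainT, pvLoopFirst, h0, h1, Bool.not_eq_true]
          by_cases hg : g
          · have hP2r : P2 r = false := by revert h2; rw [hg]; cases P2 r <;> simp
            simp [hg, hP2r]
          · simp [hg]

-- pvTier is the generic classifier at A's three predicates
theorem pvTier_eq_gTier (name_lower : String) (words : List String) :
    pvTier name_lower words = pvGTier
      (fun r => PySem.Str.strip (PySem.Str.lower (pvNameOf r)) == name_lower)
      (fun r =>
        let rn := PySem.Str.lower (pvNameOf r)
        PySem.Str.isIn name_lower rn || PySem.Str.isIn rn name_lower)
      (fun r =>
        let rn := PySem.Str.lower (pvNameOf r)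
        PySem.Str.isIn ((PySem.List.pyGet? words 0).getD "") rn &&
          (PySem.Str.isIn ((PySem.List.pyGet? words (-1)).getD "") rn ||
           PySem.Str.isIn ((PySem.List.pyGet? words 1).getD "") rn))
      (decide (2 ≤ words.length)) := by
  funext r; rfl

-- ===== VERDICT (by name: the statement is the Claim_ definition above) =====
set_option maxHeartbeats 1600000 in
theorem find_sc_match_spec : Claim_equal_find_sc_match := by
  intro results expected_name _ _
  simp only [Spec_find_sc_match, find_sc_match, find_sc_match_alt]
  rw [pvTier_eq_gTier, pvScan_eq_chainT]
  unfold pvChainT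
  simp only [decide_eq_true_eq]
  rcases h0 : pvLoopFirst _ results with _ | r0 <;> simp only [h0]
  · rcases h1 : pvLoopFirst _ results with _ | r1 <;> simp only [h1]
    · by_cases hg : 2 ≤ (PySem.Str.split₀ (PySem.Str.strip (PySem.Str.lower expected_name))).length
      · rw [if_pos hg, if_pos hg]
        rcases h2 : pvLoopFirst _ results with _ | r2 <;> simp only [h2, Option.map_none, Option.map_some]
      · rw [if_neg hg, if_neg hg]
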